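-- pv_equiv track=rewrite | github.com/Ohrys/AoC_2025 | 06-12.py | readingTopBottom
-- ===== SOURCE A (Python) =====
-- def readingTopBottom(operation:list)->list:
--     '''
--     Read 1 digit from each number to compose the new number
--
--     :param operation: a list of (str) numbers.
--     :type operation: list
--     :return: a list of newly composed (str) numbers
--     :rtype: list
--     '''
--     new_operation = []
--     #[['123', '328', ' 51', '64 '], [' 45', '64 ', '387', '23 '], ['  6', '98 ', '215', '314']]
--     while operation[0]!=[]:
--         numbers = []
--         for line in operation :
--                 numbers.append(line.pop())
--
--         size_numbers = len(numbers[0])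
--         new_numbers = []
--         for i in range(0,size_numbers):
--             new_number = ''
--             new_digit = ''
--             for i in range(0,len(numbers)) :
--
--                 if(numbers[i] != ''):
--
--                     new_digit, numbers[i] = str(numbers[i][-1]), numbers[i][:-1]
--                     new_number += str(new_digit)
--
--                 else:
--                     continue
--             new_numbers.append(new_number)
--         new_operation.append(new_numbers)
--
--     return new_operation
-- ===== SOURCE B (Python) =====
-- def readingTopBottom(operation:list)->list:
--     '''
--     Read 1 digit from each number to compose the new number (right-aligned
--     indexed transpose read; does not mutate `operation`, unlike the original).
--     '''
--     size = len(operation[0])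
--     new_operation = []
--     for t in range(size):
--         numbers = [line[-(t+1)] for line in operation]
--         width = len(numbers[0])
--         new_operation.append([''.join(num[-(j+1)] for num in numbers if len(num) > j)
--                               for j in range(width)])
--     return new_operation
-- ===== Notes on version B (the rewrite author's own statement) =====
-- stated objective: simpler
-- what changed: B replaces A's destructive while/pop loop with per-character mutate-and-slice accumulation by a direct right-aligned indexed transpose read (line[-(t+1)], then num[-(j+1)] joined per output row), without mutating the argument.
import Mathlib
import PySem

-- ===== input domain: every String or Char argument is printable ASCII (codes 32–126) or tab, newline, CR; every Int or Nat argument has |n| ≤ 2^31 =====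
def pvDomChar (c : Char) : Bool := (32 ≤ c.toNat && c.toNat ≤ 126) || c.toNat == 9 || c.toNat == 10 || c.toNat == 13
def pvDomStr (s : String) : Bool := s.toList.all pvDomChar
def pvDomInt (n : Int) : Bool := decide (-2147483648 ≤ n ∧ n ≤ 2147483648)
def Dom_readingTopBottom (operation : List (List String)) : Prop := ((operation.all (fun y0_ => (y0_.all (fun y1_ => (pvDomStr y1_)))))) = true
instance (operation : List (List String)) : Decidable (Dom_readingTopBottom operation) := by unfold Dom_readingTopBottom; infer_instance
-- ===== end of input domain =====

-- B replaces A's destructive pop-and-slice accumulation with a direct right-aligned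
-- indexed transpose read (simpler); equivalence is about the RETURN value only:
-- Python A empties the lists inside `operation` in place, B does not mutate it.

-- ===== PORT A =====
-- inner `for i in range(0, len(numbers))`: one left-to-right pass over `numbers`,
-- appending the last char of each nonempty string and trimming it (numbers[i][:-1])
def pvAScan : List String → String → String × List String
  | [], nn => (nn, [])
  | s :: rest, nn =>
    if s ≠ "" then
      let d : Char := (PySem.Str.pyGet? s (-1)).getD ' '          -- numbers[i][-1]
      let s' : String := PySem.Str.slice s none (some (-1))       -- numbers[i][:-1]
      let r := pvAScan rest (nn.push d)                           -- new_number += new_digit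
      (r.1, s' :: r.2)
    else
      let r := pvAScan rest nn                                    -- continue
      (r.1, s :: r.2)

-- `for i in range(0, size_numbers)`: size_numbers rounds of the scan, collecting new_numbers
def pvAInner : Nat → List String → List String → List String
  | 0, _, acc => acc
  | n + 1, nums, acc =>
      let r := pvAScan nums ""
      pvAInner n r.2 (acc ++ [r.1])

-- `while operation[0] != []`: pop the last element of every line, build new_numbers, recurse
def pvAOuter (op : List (List String)) (acc : List (List String)) : List (List String) :=
  if h : (op.headD []) ≠ [] then
    let numbers := op.map (fun line => (line.getLast?).getD "")         -- line.pop()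
    let op' := op.map List.dropLast
    let size := (numbers.headD "").toList.length                        -- len(numbers[0])
    pvAOuter op' (acc ++ [pvAInner size numbers []])
  else acc
termination_by (op.headD []).length
decreasing_by
  cases op with
  | nil => simp at h
  | cons l t =>
      simp only [List.headD_cons] at h ⊢
      simp [List.length_dropLast]
      exact List.length_pos_of_ne_nil h

def readingTopBottom (operation : List (List String)) : List (List String) :=
  pvAOuter operation []

-- ===== PORT B =====
-- ''.join of the one-character strings num[-(j+1)] is ported as the join of those singletons
def readingTopBottom_alt (operation : List (List String)) : List (List String) :=
  let size := (operation.headD []).length                               -- len(operation[0])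
  (List.range size).map (fun (t : Nat) =>
    let numbers := operation.map
      (fun line => (PySem.List.pyGet? line (-((t : Int) + 1))).getD "") -- line[-(t+1)]
    (List.range ((numbers.headD "").toList.length)).map (fun (j : Nat) =>
      PySem.Str.join "" ((numbers.filter (fun num => decide (j < num.toList.length))).map
        (fun num => ((PySem.Str.pyGet? num (-((j : Int) + 1))).getD ' ').toString))))

-- ===== PRECONDITION & SPEC =====
-- Pre_ excludes exactly the inputs where Python A raises IndexError: the empty list
-- (operation[0]) and ragged inputs where some line is shorter than the first one (line.pop()).
def Pre_readingTopBottom (operation : List (List String)) : Prop :=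
  operation ≠ [] ∧ ∀ l ∈ operation, (operation.headD []).length ≤ l.length
instance (operation : List (List String)) : Decidable (Pre_readingTopBottom operation) := by
  unfold Pre_readingTopBottom; infer_instance

def pvWitness_readingTopBottom : List (List String) := [["12", "34"], ["5", "678"]]

def Spec_readingTopBottom (operation : List (List String)) (out : List (List String)) : Prop := out = readingTopBottom_alt operation
instance (operation : List (List String)) (out : List (List String)) : Decidable (Spec_readingTopBottom operation out) := by unfold Spec_readingTopBottom; infer_instance

-- ===== CLAIM (what is proved, stated in full; the proofs are below) =====
def Claim_equal_readingTopBottom : Prop := ∀ (operation : List (List String)), Dom_readingTopBottom operation → Pre_readingTopBottom operation → Spec_readingTopBottom operation (readingTopBottom operation)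

-- ===== LEMMAS AND PROOFS =====

-- the string each inner round j produces, read off the untrimmed numbers
def pvRow (nums : List String) (j : Nat) : List Char :=
  (nums.filter (fun s => decide (j < s.toList.length))).map
    (fun s => s.toList.getD (s.toList.length - 1 - j) ' ')

-- A's inner state after j rounds: each string trimmed by j characters from the right
def pvTrim (j : Nat) (s : String) : String :=
  String.ofList (s.toList.take (s.toList.length - j))

theorem pvTrim_toList (j : Nat) (s : String) :
    (pvTrim j s).toList = s.toList.take (s.toList.length - j) := by
  simp [pvTrim]

theorem pvTrim_zero (s : String) : pvTrim 0 s = s := by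
  rw [pvTrim, Nat.sub_zero, List.take_length, String.ofList_toList]

theorem pvTrim_ne_empty_iff (j : Nat) (s : String) :
    pvTrim j s ≠ "" ↔ j < s.toList.length := by
  rw [ne_eq, ← String.toList_inj, pvTrim_toList]
  rw [show (("" : String).toList) = ([] : List Char) from rfl]
  rw [List.take_eq_nil_iff, ← List.length_eq_zero_iff]
  omega

theorem pvRow_cons_pos (s : String) (rest : List String) (j : Nat)
    (hj : j < s.toList.length) :
    pvRow (s :: rest) j = s.toList.getD (s.toList.length - 1 - j) ' ' :: pvRow rest j := by
  have hj' : j < s.length := by rw [← String.length_toList]; exact hj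
  simp [pvRow, hj']

theorem pvRow_cons_neg (s : String) (rest : List String) (j : Nat)
    (hj : ¬ j < s.toList.length) :
    pvRow (s :: rest) j = pvRow rest j := by
  have hj' : ¬ j < s.length := by rw [← String.length_toList]; exact hj
  simp [pvRow, hj']

theorem pvAScan_spec (nums : List String) (j : Nat) (nn : String) :
    pvAScan (nums.map (pvTrim j)) nn =
      (nn ++ String.ofList (pvRow nums j), nums.map (pvTrim (j + 1))) := by
  induction nums generalizing nn with
  | nil =>
      refine Prod.ext ?_ rfl
      rw [← String.toList_inj]
      simp [pvAScan, pvRow]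
  | cons s rest ih =>
      by_cases hj : j < s.toList.length
      · have hne : pvTrim j s ≠ "" := (pvTrim_ne_empty_iff j s).mpr hj
        have hd : (PySem.Str.pyGet? (pvTrim j s) (-1)).getD ' '
            = s.toList.getD (s.toList.length - 1 - j) ' ' := by
          rw [PySem.Str.pyGet?_eq]
          simp only [PySem.Chars.pyGet?_eq_listPyGet?]
          rw [PySem.List.pyGet?_neg_one, pvTrim_toList]
          rw [List.getLast?_eq_getElem?, List.getD_eq_getElem?_getD]
          simp only [List.length_take, List.getElem?_take]
          have h1 : min (s.toList.length - j) s.toList.length = s.toList.length - j := by omega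
          rw [h1]
          rw [if_pos (by omega)]
          have h2 : s.toList.length - j - 1 = s.toList.length - 1 - j := by omega
          rw [h2]
        have hs' : PySem.Str.slice (pvTrim j s) none (some (-1)) = pvTrim (j + 1) s := by
          rw [← String.toList_inj, PySem.Str.slice_to_neg_one, pvTrim_toList, pvTrim_toList]
          rw [List.dropLast_eq_take, List.length_take, List.take_take]
          congr 1
          omega
        simp only [List.map_cons, pvAScan, if_pos hne, hd, hs', ih]
        rw [pvRow_cons_pos s rest j hj]
        refine Prod.ext ?_ rfl
        rw [← String.toList_inj]
        simp [String.toList_push]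
      · have heq : pvTrim j s = "" := by
          by_contra hc
          exact hj ((pvTrim_ne_empty_iff j s).mp hc)
        have heq' : pvTrim (j + 1) s = "" := by
          by_contra hc
          have := (pvTrim_ne_empty_iff (j + 1) s).mp hc
          omega
        have hne : ¬ (pvTrim j s ≠ "") := by simp [heq]
        simp only [List.map_cons, pvAScan, if_neg hne, ih]
        rw [pvRow_cons_neg s rest j hj, heq, heq']

theorem pvAInner_spec (n : Nat) (nums : List String) :
    ∀ (j : Nat) (acc : List String),
    pvAInner n (nums.map (pvTrim j)) acc
      = acc ++ (List.range' j n).map (fun i => String.ofList (pvRow nums i)) := by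
  induction n with
  | zero => intro j acc; simp [pvAInner]
  | succ n ih =>
      intro j acc
      rw [pvAInner, pvAScan_spec, ih (j + 1)]
      simp [List.range'_succ]

theorem pvAInner_from_zero (n : Nat) (nums : List String) :
    pvAInner n nums [] = (List.range n).map (fun i => String.ofList (pvRow nums i)) := by
  have h := pvAInner_spec n nums 0 []
  simp only [funext (pvTrim_zero)] at h
  simpa [List.range_eq_range'] using h

-- B's row t, as readingTopBottom_alt computes it
def pvBRow (op : List (List String)) (t : Nat) : List String :=
  let numbers := op.map (fun line => (PySem.List.pyGet? line (-((t : Int) + 1))).getD "")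
  (List.range ((numbers.headD "").toList.length)).map (fun (j : Nat) =>
    PySem.Str.join "" ((numbers.filter (fun num => decide (j < num.toList.length))).map
      (fun num => ((PySem.Str.pyGet? num (-((j : Int) + 1))).getD ' ').toString)))

theorem pvJoin_cons (x : String) (xs : List String) :
    (PySem.Str.join "" (x :: xs)).toList = x.toList ++ (PySem.Str.join "" xs).toList := by
  simp only [PySem.Str.toList_join, List.map_cons]
  cases xs with
  | nil => simp [PySem.Chars.join_singleton, PySem.Chars.join_nil]
  | cons y ys => simp [PySem.Chars.join_cons_cons]

-- a single B-row entry equals the corresponding inner-round string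
theorem pvBRow_inner (nums : List String) (j : Nat) :
    PySem.Str.join "" ((nums.filter (fun num => decide (j < num.toList.length))).map
      (fun num => ((PySem.Str.pyGet? num (-((j : Int) + 1))).getD ' ').toString))
    = String.ofList (pvRow nums j) := by
  induction nums with
  | nil =>
      rw [← String.toList_inj]
      simp [pvRow, PySem.Chars.join_nil]
  | cons s rest ih =>
      by_cases hj : j < s.toList.length
      · have hget : (PySem.Str.pyGet? s (-((j : Int) + 1))).getD ' '
            = s.toList.getD (s.toList.length - 1 - j) ' ' := by
          have hcast : -((j : Int) + 1) = -(((j + 1 : Nat) : Int)) := by push_cast; ring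
          rw [PySem.Str.pyGet?_eq]
          simp only [PySem.Chars.pyGet?_eq_listPyGet?]
          rw [hcast, PySem.List.pyGet?_neg_natCast s.toList (j + 1) (by omega) (by omega)]
          rw [List.getD_eq_getElem?_getD]
          have h2 : s.toList.length - (j + 1) = s.toList.length - 1 - j := by omega
          rw [h2]
        rw [← String.toList_inj]
        simp only [List.filter_cons, decide_eq_true_eq]
        rw [if_pos hj]
        simp only [List.map_cons]
        rw [pvJoin_cons, congrArg String.toList ih]
        rw [pvRow_cons_pos s rest j hj, hget]
        simp
      · rw [← String.toList_inj]
        simp only [List.filter_cons, decide_eq_true_eq]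
        rw [if_neg hj, pvRow_cons_neg s rest j hj]
        exact congrArg String.toList ih

-- pvBRow, with each joined entry replaced by the corresponding pvRow string
theorem pvBRow_eq (op : List (List String)) (t : Nat) :
    pvBRow op t = (List.range (((op.map
        (fun line => (PySem.List.pyGet? line (-((t : Int) + 1))).getD "")).headD "").toList.length)).map
      (fun i => String.ofList (pvRow (op.map
        (fun line => (PySem.List.pyGet? line (-((t : Int) + 1))).getD "")) i)) := by
  unfold pvBRow
  apply List.map_congr_left
  intro j _
  rw [pvBRow_inner]

theorem pvAOuter_spec (k : Nat) :
    ∀ (op : List (List String)) (acc : List (List String)),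
    (op.headD []).length = k →
    (∀ l ∈ op, k ≤ l.length) →
    pvAOuter op acc = acc ++ (List.range k).map (pvBRow op) := by
  induction k with
  | zero =>
      intro op acc hk _
      rw [pvAOuter, dif_neg]
      · simp
      · intro hne
        exact hne (List.eq_nil_of_length_eq_zero hk)
  | succ k ih =>
      intro op acc hk hall
      have hop : op ≠ [] := by
        intro h; subst h; simp at hk
      obtain ⟨l0, rest, rfl⟩ := List.exists_cons_of_ne_nil hop
      have hl0 : l0.length = k + 1 := by simpa using hk
      have hne : ((l0 :: rest).headD []) ≠ [] := by
        simp only [List.headD_cons]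
        intro h; subst h; simp at hl0
      rw [pvAOuter, dif_pos hne]
      simp only [List.map_cons, List.headD_cons]
      have hstep : ∀ l ∈ (l0 :: rest), ∀ t : Nat, t < k →
          PySem.List.pyGet? l.dropLast (-((t : Int) + 1))
            = PySem.List.pyGet? l (-(((t + 1 : Nat) : Int) + 1)) := by
        intro l hl t ht
        have hlen : k + 1 ≤ l.length := hall l hl
        have h1 : -((t : Int) + 1) = -(((t + 1 : Nat) : Int)) := by push_cast; ring
        have h2 : -(((t + 1 : Nat) : Int) + 1) = -(((t + 2 : Nat) : Int)) := by push_cast; ring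
        rw [h1, h2,
          PySem.List.pyGet?_neg_natCast l.dropLast (t + 1) (by omega)
            (by rw [List.length_dropLast]; omega),
          PySem.List.pyGet?_neg_natCast l (t + 2) (by omega) (by omega)]
        rw [List.length_dropLast, List.dropLast_eq_take, List.getElem?_take]
        rw [if_pos (by omega)]
        congr 1
        omega
      refine Eq.trans (ih (l0.dropLast :: rest.map List.dropLast)
        (acc ++ [pvAInner (l0.getLast?.getD "").toList.length
          (l0.getLast?.getD "" :: rest.map (fun line => line.getLast?.getD "")) []])
        (by simp only [List.headD_cons, List.length_dropLast]; omega)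
        (by intro l hl
            simp only [List.mem_cons, List.mem_map] at hl
            rcases hl with rfl | ⟨l', hl', rfl⟩
            · simp only [List.length_dropLast]; omega
            · have := hall l' (List.mem_cons_of_mem _ hl')
              simp only [List.length_dropLast]; omega)) ?_
      rw [List.range_succ_eq_map]
      simp only [List.map_cons, List.map_map, List.append_assoc, List.singleton_append]
      -- head row: A's inner loop on the popped numbers = B's row 0
      have hhead : pvAInner (l0.getLast?.getD "").toList.length
          (l0.getLast?.getD "" :: rest.map (fun line => line.getLast?.getD "")) []
          = pvBRow (l0 :: rest) 0 := by
        rw [pvAInner_from_zero, pvBRow_eq]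
        have hcol : (l0 :: rest).map
            (fun line => (PySem.List.pyGet? line (-(((0 : Nat) : Int) + 1))).getD "")
            = l0.getLast?.getD "" :: rest.map (fun line => line.getLast?.getD "") := by
          simp only [List.map_cons]
          have h0 : -(((0 : Nat) : Int) + 1) = -1 := by norm_num
          congr 1
          · rw [h0, PySem.List.pyGet?_neg_one]
          · apply List.map_congr_left
            intro l _
            rw [h0, PySem.List.pyGet?_neg_one]
        rw [hcol, List.headD_cons]
      -- tail rows: row t of the popped lines = row (t+1) of the original lines
      have htail : List.map (pvBRow (l0.dropLast :: rest.map List.dropLast)) (List.range k)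
          = List.map (pvBRow (l0 :: rest) ∘ (fun t => t + 1)) (List.range k) := by
        apply List.map_congr_left
        intro t ht
        simp only [Function.comp]
        have hcols : (l0.dropLast :: rest.map List.dropLast).map
            (fun line => (PySem.List.pyGet? line (-((t : Int) + 1))).getD "")
            = (l0 :: rest).map
                (fun line => (PySem.List.pyGet? line (-(((t + 1 : Nat) : Int) + 1))).getD "") := by
          have hX : (l0.dropLast :: rest.map List.dropLast) = (l0 :: rest).map List.dropLast := by
            simp
          rw [hX, List.map_map]
          apply List.map_congr_left
          intro l hl
          simp only [Function.comp]
          rw [hstep l hl t (List.mem_range.mp ht)]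
        rw [pvBRow_eq, pvBRow_eq, hcols]
      rw [hhead, htail]

-- ===== VERDICT (by name: the statement is the Claim_ definition above) =====
theorem readingTopBottom_spec : Claim_equal_readingTopBottom := by
  intro op _ hpre
  obtain ⟨hne, hall⟩ := hpre
  unfold Spec_readingTopBottom readingTopBottom readingTopBottom_alt
  rw [pvAOuter_spec ((op.headD []).length) op [] rfl hall]
  simp only [List.nil_append]
  exact List.map_congr_left (fun t _ => rfl)
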